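-- pv_equiv track=rewrite | github.com/Ashiq-am/Path-of-Python | 3.Data Types/Python String/Programs of Python Strings/Map function and Dictionary in Python to sum ASCII values/Sums of ASCII values of each word in a sentence/Sums of ASCII values of each word in a sentence.py | ASCIIWordSum
-- ===== SOURCE A (Python) =====
-- def ASCIIWordSum(str, sumArr):
--     l = len(str)
--     sum = 0
--     bigSum = 0
--     for i in range(l):
--
--         # Separate each word by a space
--         # and store values corresponding
--         # to each word
--         if (str[i] == ' '):
--
--             bigSum += sum
--             sumArr.append(sum)
--             sum = 0
--
--         else:
--
--             # Implicit type casting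
--             sum += ord(str[i])
--
--         # Storing the value of last word
--     sumArr.append(sum)
--     bigSum += sum
--     return bigSum
-- ===== SOURCE B (Python) =====
-- def ASCIIWordSum(str, sumArr):
--     # split-then-aggregate: tokenize on single spaces (keeps empty words,
--     # exactly like A's character scan), then sum each word's ASCII codes.
--     bigSum = 0
--     for word in str.split(' '):
--         s = sum(ord(c) for c in word)
--         sumArr.append(s)
--         bigSum += s
--     return bigSum
-- ===== Notes on version B (the rewrite author's own statement) =====
-- stated objective: simpler
-- what changed: Replaces A's fused character-by-character state machine (running word sum reset on each space, plus a trailing flush) with a two-phase split(' ')-then-aggregate loop over whole words.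
import Mathlib
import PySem

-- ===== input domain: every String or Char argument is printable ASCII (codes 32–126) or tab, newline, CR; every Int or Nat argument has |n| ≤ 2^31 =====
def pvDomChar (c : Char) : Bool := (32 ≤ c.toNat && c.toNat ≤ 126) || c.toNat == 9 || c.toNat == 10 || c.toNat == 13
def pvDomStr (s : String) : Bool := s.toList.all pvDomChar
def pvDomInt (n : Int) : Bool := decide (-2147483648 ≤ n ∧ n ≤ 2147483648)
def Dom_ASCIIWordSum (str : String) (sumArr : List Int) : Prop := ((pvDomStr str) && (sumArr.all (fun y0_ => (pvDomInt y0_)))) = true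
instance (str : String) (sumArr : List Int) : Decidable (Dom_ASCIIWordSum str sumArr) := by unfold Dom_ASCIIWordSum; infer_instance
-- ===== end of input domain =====

-- B replaces A's fused per-character state machine with a split(' ')-then-aggregate
-- two-phase loop (objective: simpler). Both A and B append the same per-word sums to
-- sumArr; the equivalence proved here is about the RETURN value only.

-- ===== PORT A =====
-- state = (sum, bigSum, sumArr); the for-loop over range(l) indexes str character by character
def ASCIIWordSum (str : String) (sumArr : List Int) : Int :=
  let r := str.toList.foldl
    (fun (st : Int × Int × List Int) c =>
      if c = ' ' then (0, st.2.1 + st.1, st.2.2 ++ [st.1])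
      else (st.1 + (c.toNat : Int), st.2.1, st.2.2))
    (0, 0, sumArr)
  r.2.1 + r.1

-- ===== PORT B =====
-- sum(ord(c) for c in word)
def pvWordOrd (w : String) : Int :=
  w.toList.foldl (fun s c => s + (c.toNat : Int)) 0

def ASCIIWordSum_alt (str : String) (sumArr : List Int) : Int :=
  -- str.split(' '): sep is nonempty, so split? is always `some`; getD [] is unreachable
  let ws := (PySem.Str.split? str " ").getD []
  let r := ws.foldl
    (fun (st : Int × List Int) w =>
      let s := pvWordOrd w
      (st.1 + s, st.2 ++ [s]))
    (0, sumArr)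
  r.1

-- ===== PRECONDITION & SPEC =====
def Spec_ASCIIWordSum (str : String) (sumArr : List Int) (out : Int) : Prop := out = ASCIIWordSum_alt str sumArr
instance (str : String) (sumArr : List Int) (out : Int) : Decidable (Spec_ASCIIWordSum str sumArr out) := by unfold Spec_ASCIIWordSum; infer_instance

-- ===== CLAIM (what is proved, stated in full; the proofs are below) =====
def Claim_equal_ASCIIWordSum : Prop := ∀ (str : String) (sumArr : List Int), Dom_ASCIIWordSum str sumArr → Spec_ASCIIWordSum str sumArr (ASCIIWordSum str sumArr)

-- ===== LEMMAS AND PROOFS =====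

-- sum of ASCII codes of a character list
def pvCharsSum (l : List Char) : Int := (l.map (fun c => (c.toNat : Int))).sum

theorem pvWordOrd_go (l : List Char) : ∀ a : Int,
    l.foldl (fun s c => s + (c.toNat : Int)) a = a + pvCharsSum l := by
  induction l with
  | nil => intro a; simp [pvCharsSum]
  | cons c t ih => intro a; simp [pvCharsSum, List.foldl, ih]; ring

theorem pvWordOrd_eq (w : String) : pvWordOrd w = pvCharsSum w.toList := by
  simp [pvWordOrd, pvWordOrd_go]

-- A's loop: bigSum + sum at the end = initial big + sum + ASCII sum of the non-space tail
theorem A_fold (l : List Char) : ∀ (s b : Int) (arr : List Int),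
    (let r := l.foldl
      (fun (st : Int × Int × List Int) c =>
        if c = ' ' then (0, st.2.1 + st.1, st.2.2 ++ [st.1])
        else (st.1 + (c.toNat : Int), st.2.1, st.2.2))
      (s, b, arr)
     r.2.1 + r.1) = b + s + pvCharsSum (l.filter (· ≠ ' ')) := by
  induction l with
  | nil => intro s b arr; simp [pvCharsSum]
  | cons c t ih =>
    intro s b arr
    by_cases hc : c = ' ' <;>
      simp only [List.foldl, hc, if_pos, if_neg, List.filter] <;>
      simp [hc, ih, pvCharsSum] <;> ring

-- B's loop: bigSum at the end = initial + sum of per-word sums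
theorem B_fold (ws : List String) : ∀ (b : Int) (arr : List Int),
    (ws.foldl
      (fun (st : Int × List Int) w =>
        let s := pvWordOrd w
        (st.1 + s, st.2 ++ [s]))
      (b, arr)).1 = b + (ws.map (fun w => pvCharsSum w.toList)).sum := by
  induction ws with
  | nil => intro b arr; simp
  | cons w t ih =>
    intro b arr
    rw [List.foldl_cons, ih]
    simp [pvWordOrd_eq]
    ring

-- splitOn.go with sep [' ']: total ASCII of all produced words
theorem splitOn_go_sum (fuel : Nat) : ∀ (l cur : List Char) (acc : List (List Char)),
    l.length < fuel →
    ((PySem.Chars.splitOn.go [' '] fuel l cur acc).map pvCharsSum).sum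
      = (acc.map pvCharsSum).sum + pvCharsSum cur + pvCharsSum (l.filter (· ≠ ' ')) := by
  induction fuel with
  | zero => intro l cur acc h; omega
  | succ n ih =>
    intro l cur acc h
    cases l with
    | nil => simp [PySem.Chars.splitOn.go, pvCharsSum, List.sum_reverse]
    | cons c t =>
      by_cases hc : c = ' '
      · subst hc
        rw [PySem.Chars.splitOn.go]
        rw [if_pos (by simp [List.isPrefixOf])]
        simp only [List.length_singleton, List.drop_one, List.tail_cons]
        rw [ih t [] (List.reverse cur :: acc) (by simp at h; omega)]
        simp [pvCharsSum, List.filter]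
        ring
      · rw [PySem.Chars.splitOn.go]
        rw [if_neg (by simp [List.isPrefixOf]; exact fun h => hc h.symm)]
        rw [ih t (c :: cur) acc (by simpa using Nat.lt_of_succ_lt_succ h)]
        simp [pvCharsSum, List.filter, hc]
        ring

theorem splitOn_sum (l : List Char) :
    ((PySem.Chars.splitOn l [' ']).map pvCharsSum).sum = pvCharsSum (l.filter (· ≠ ' ')) := by
  simp [PySem.Chars.splitOn, splitOn_go_sum l.length.succ l [] [] (by omega), pvCharsSum]

-- ===== VERDICT (by name: the statement is the Claim_ definition above) =====
theorem ASCIIWordSum_spec : Claim_equal_ASCIIWordSum := by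
  intro str sumArr _
  unfold Spec_ASCIIWordSum ASCIIWordSum ASCIIWordSum_alt
  rw [A_fold]
  have hsplit : PySem.Str.split? str " "
      = some ((PySem.Chars.splitOn str.toList [' ']).map String.ofList) := by
    simp [PySem.Str.split?, PySem.Chars.split?]
  rw [hsplit]
  simp only [Option.getD_some]
  rw [B_fold]
  rw [← splitOn_sum str.toList]
  have hmap : List.map (fun w : String => pvCharsSum w.toList)
      ((PySem.Chars.splitOn str.toList [' ']).map String.ofList)
      = List.map pvCharsSum (PySem.Chars.splitOn str.toList [' ']) := by
    rw [List.map_map]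
    exact List.map_congr_left (fun w _ => by
      show pvCharsSum (String.ofList w).toList = pvCharsSum w
      simp)
  rw [hmap]
  ring
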